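-- pv_equiv track=rewrite | github.com/youtube/cobalt | tools/captured_sites/bisect_failures.py | _TranslateSiteName
-- ===== SOURCE A (Python) =====
-- def _TranslateSiteName(site_name):
--   """Translates complex site_name into array of necessary parts depending on
--        if it is a password or autofill type name.
--
--     Args:
--         site_name: For autofill, basic site_name, but for Password, a site_name
--                    with password scenario prefix.
--     Returns:
--         A list containing the parsed pieces describing the scenario & site_name.
--   """
--   password_prefixes = [
--       'sign_up_fill', 'sign_up_pass', 'sign_in_pass', 'capture_update_pass'
--   ]
--   for password_prefix in password_prefixes:
--     if site_name.startswith(password_prefix + '_'):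
--       return [password_prefix, site_name[len(password_prefix + '_'):]]
--   return [site_name]
-- ===== SOURCE B (Python) =====
-- def _TranslateSiteName(site_name):
--   """Single left-to-right scan: the password prefixes all contain exactly two
--   internal underscores, so a matching site_name splits at its third underscore."""
--   password_prefixes = {
--       'sign_up_fill', 'sign_up_pass', 'sign_in_pass', 'capture_update_pass'
--   }
--   underscores = 0
--   for i, ch in enumerate(site_name):
--     if ch == '_':
--       underscores += 1
--       if underscores == 3:
--         prefix = site_name[:i]
--         if prefix in password_prefixes:
--           return [prefix, site_name[i + 1:]]
--         break
--   return [site_name]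
-- ===== Notes on version B (the rewrite author's own statement) =====
-- stated objective: alternative
-- what changed: Replaces A's loop of four startswith probes by a single left-to-right scan that counts underscores and splits the string at its third underscore, then checks the head against a prefix set once.
import Mathlib
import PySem

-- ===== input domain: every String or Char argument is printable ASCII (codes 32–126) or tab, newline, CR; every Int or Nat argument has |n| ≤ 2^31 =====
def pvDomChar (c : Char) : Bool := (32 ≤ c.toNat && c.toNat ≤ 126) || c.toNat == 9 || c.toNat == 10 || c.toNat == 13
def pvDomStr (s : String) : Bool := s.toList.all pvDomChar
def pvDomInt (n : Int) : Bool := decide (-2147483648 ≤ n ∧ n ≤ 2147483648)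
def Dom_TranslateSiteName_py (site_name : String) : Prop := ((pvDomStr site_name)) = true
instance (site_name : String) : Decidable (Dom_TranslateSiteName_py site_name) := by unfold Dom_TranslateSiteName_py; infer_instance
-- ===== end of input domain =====

-- B replaces A's loop of four startswith probes by one underscore-counting scan that splits at the third underscore (alternative decomposition, same behaviour).

-- ===== PORT A =====
-- the 'for password_prefix in password_prefixes' loop of A, one prefix per step
def pvAGo (site_name : String) : List String → List String
  | [] => [site_name]
  | p :: ps =>
      let pu := p ++ "_"
      if PySem.Str.startswith site_name pu then
        [p, PySem.Str.slice site_name (some (PySem.Str.len pu)) none]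
      else pvAGo site_name ps

def TranslateSiteName_py (site_name : String) : List String :=
  pvAGo site_name ["sign_up_fill", "sign_up_pass", "sign_in_pass", "capture_update_pass"]

-- ===== PORT B =====
def pvPrefixSet : PySem.Set (List Char) :=
  PySem.Set.ofList ["sign_up_fill".toList, "sign_up_pass".toList, "sign_in_pass".toList,
                    "capture_update_pass".toList]

-- the 'for i, ch in enumerate(site_name)' loop of B: i is the index, the list the remaining characters
def pvBGo (site_name : String) (underscores i : Nat) : List Char → List String
  | [] => [site_name]
  | ch :: rest =>
      if ch = '_' then
        if underscores + 1 = 3 then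
          let pfx := site_name.toList.take i
          if pfx ∈ pvPrefixSet then
            [String.ofList pfx, String.ofList (site_name.toList.drop (i + 1))]
          else [site_name]
        else pvBGo site_name (underscores + 1) (i + 1) rest
      else pvBGo site_name underscores (i + 1) rest

def TranslateSiteName_py_alt (site_name : String) : List String :=
  pvBGo site_name 0 0 site_name.toList

-- ===== PRECONDITION & SPEC =====
def Spec_TranslateSiteName_py (site_name : String) (out : List String) : Prop := out = TranslateSiteName_py_alt site_name
instance (site_name : String) (out : List String) : Decidable (Spec_TranslateSiteName_py site_name out) := by unfold Spec_TranslateSiteName_py; infer_instance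

-- ===== CLAIM (what is proved, stated in full; the proofs are below) =====
def Claim_equal_TranslateSiteName_py : Prop := ∀ (site_name : String), Dom_TranslateSiteName_py site_name → Spec_TranslateSiteName_py site_name (TranslateSiteName_py site_name)

-- ===== LEMMAS AND PROOFS =====

-- s[len(prefix_)+…:] is the remainder after the matched prefix
theorem pvSlice_eq (s : String) (pre rest : List Char) (h : pre ++ rest = s.toList)
    (n : Int) (hn : 0 ≤ n) (hlen : pre.length = n.toNat) :
    PySem.Str.slice s (some n) none = String.ofList rest := by
  apply String.toList_inj.mp
  rw [PySem.Str.toList_slice]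
  simp only [PySem.Chars.slice_eq_listSlice, ← h]
  rw [PySem.List.slice_from _ hn, ← hlen, List.drop_left]
  simp

-- B's scan returns [s] when no password prefix (plus '_') starts s
theorem pvB_nomatch (s : String)
    (h1 : ¬ "sign_up_fill_".toList <+: s.toList)
    (h2 : ¬ "sign_up_pass_".toList <+: s.toList)
    (h3 : ¬ "sign_in_pass_".toList <+: s.toList)
    (h4 : ¬ "capture_update_pass_".toList <+: s.toList) :
    ∀ (rest : List Char) (u i : Nat), s.toList.drop i = rest → pvBGo s u i rest = [s] := by
  intro rest
  induction rest with
  | nil => intro u i _; simp [pvBGo]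
  | cons ch rs ih =>
    intro u i hdrop
    have hsplit : s.toList = s.toList.take i ++ ch :: rs := by
      conv_lhs => rw [← List.take_append_drop i s.toList]
      rw [hdrop]
    have hnext : s.toList.drop (i + 1) = rs := by
      rw [← List.drop_drop, hdrop]; rfl
    by_cases hch : ch = '_'
    · subst hch
      by_cases hu : u + 1 = 3
      · simp only [pvBGo, if_pos hu]
        have hmem : s.toList.take i ∉ pvPrefixSet := by
          intro hmem
          rw [pvPrefixSet, PySem.Set.mem_ofList] at hmem
          simp only [List.mem_cons, List.not_mem_nil, or_false] at hmem
          rcases hmem with hp | hp | hp | hp <;>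
            first
            | (exact h1 ⟨rs, by rw [show "sign_up_fill_".toList = "sign_up_fill".toList ++ ['_'] from by decide, ← hp]; simpa using hsplit.symm⟩)
            | (exact h2 ⟨rs, by rw [show "sign_up_pass_".toList = "sign_up_pass".toList ++ ['_'] from by decide, ← hp]; simpa using hsplit.symm⟩)
            | (exact h3 ⟨rs, by rw [show "sign_in_pass_".toList = "sign_in_pass".toList ++ ['_'] from by decide, ← hp]; simpa using hsplit.symm⟩)
            | (exact h4 ⟨rs, by rw [show "capture_update_pass_".toList = "capture_update_pass".toList ++ ['_'] from by decide, ← hp]; simpa using hsplit.symm⟩)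
        simp [hmem]
      · simp only [pvBGo, if_neg hu]
        exact ih (u + 1) (i + 1) hnext
    · simp only [pvBGo, if_neg hch]
      exact ih u (i + 1) hnext

-- ===== VERDICT (by name: the statement is the Claim_ definition above) =====
theorem TranslateSiteName_py_spec : Claim_equal_TranslateSiteName_py := by
  intro s _
  unfold Spec_TranslateSiteName_py TranslateSiteName_py TranslateSiteName_py_alt
  by_cases h1 : "sign_up_fill_".toList <+: s.toList
  · obtain ⟨rest, hr⟩ := h1
    have hsw : PySem.Str.startswith s ("sign_up_fill" ++ "_") = true := by
      simp [PySem.Chars.startswith_iff, ← hr]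
    have hsl := pvSlice_eq s "sign_up_fill_".toList rest hr 13 (by norm_num) (by decide)
    have hlen : PySem.Str.len ("sign_up_fill" ++ "_") = (13 : Int) := by decide
    simp only [pvAGo, hsw, if_pos, hlen, hsl]
    rw [show s.toList = "sign_up_fill_".toList ++ rest from hr.symm]
    simp [pvBGo, pvPrefixSet, ← hr]
  · by_cases h2 : "sign_up_pass_".toList <+: s.toList
    · obtain ⟨rest, hr⟩ := h2
      have hsw1 : PySem.Str.startswith s ("sign_up_fill" ++ "_") = false := by
        simp [PySem.Chars.startswith, ← hr, List.isPrefixOf]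
      have hsw : PySem.Str.startswith s ("sign_up_pass" ++ "_") = true := by
        simp [PySem.Chars.startswith_iff, ← hr]
      have hsl := pvSlice_eq s "sign_up_pass_".toList rest hr 13 (by norm_num) (by decide)
      have hlen : PySem.Str.len ("sign_up_pass" ++ "_") = (13 : Int) := by decide
      simp only [pvAGo, hsw1, hsw, if_pos, Bool.false_eq_true, if_false, hlen, hsl]
      rw [show s.toList = "sign_up_pass_".toList ++ rest from hr.symm]
      simp [pvBGo, pvPrefixSet, ← hr]
    · by_cases h3 : "sign_in_pass_".toList <+: s.toList
      · obtain ⟨rest, hr⟩ := h3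
        have hsw1 : PySem.Str.startswith s ("sign_up_fill" ++ "_") = false := by
          simp [PySem.Chars.startswith, ← hr, List.isPrefixOf]
        have hsw2 : PySem.Str.startswith s ("sign_up_pass" ++ "_") = false := by
          simp [PySem.Chars.startswith, ← hr, List.isPrefixOf]
        have hsw : PySem.Str.startswith s ("sign_in_pass" ++ "_") = true := by
          simp [PySem.Chars.startswith_iff, ← hr]
        have hsl := pvSlice_eq s "sign_in_pass_".toList rest hr 13 (by norm_num) (by decide)
        have hlen : PySem.Str.len ("sign_in_pass" ++ "_") = (13 : Int) := by decide
        simp only [pvAGo, hsw1, hsw2, hsw, if_pos, Bool.false_eq_true, if_false, hlen, hsl]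
        rw [show s.toList = "sign_in_pass_".toList ++ rest from hr.symm]
        simp [pvBGo, pvPrefixSet, ← hr]
      · by_cases h4 : "capture_update_pass_".toList <+: s.toList
        · obtain ⟨rest, hr⟩ := h4
          have hsw1 : PySem.Str.startswith s ("sign_up_fill" ++ "_") = false := by
            simp [PySem.Chars.startswith, ← hr, List.isPrefixOf]
          have hsw2 : PySem.Str.startswith s ("sign_up_pass" ++ "_") = false := by
            simp [PySem.Chars.startswith, ← hr, List.isPrefixOf]
          have hsw3 : PySem.Str.startswith s ("sign_in_pass" ++ "_") = false := by
            simp [PySem.Chars.startswith, ← hr, List.isPrefixOf]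
          have hsw : PySem.Str.startswith s ("capture_update_pass" ++ "_") = true := by
            simp [PySem.Chars.startswith_iff, ← hr]
          have hsl := pvSlice_eq s "capture_update_pass_".toList rest hr 20 (by norm_num) (by decide)
          have hlen : PySem.Str.len ("capture_update_pass" ++ "_") = (20 : Int) := by decide
          simp only [pvAGo, hsw1, hsw2, hsw3, hsw, if_pos, Bool.false_eq_true, if_false, hlen, hsl]
          rw [show s.toList = "capture_update_pass_".toList ++ rest from hr.symm]
          simp [pvBGo, pvPrefixSet, ← hr]
        · have hsw1 : PySem.Str.startswith s ("sign_up_fill" ++ "_") = false := by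
            rw [Bool.eq_false_iff]; simp [PySem.Chars.startswith_iff]; exact h1
          have hsw2 : PySem.Str.startswith s ("sign_up_pass" ++ "_") = false := by
            rw [Bool.eq_false_iff]; simp [PySem.Chars.startswith_iff]; exact h2
          have hsw3 : PySem.Str.startswith s ("sign_in_pass" ++ "_") = false := by
            rw [Bool.eq_false_iff]; simp [PySem.Chars.startswith_iff]; exact h3
          have hsw4 : PySem.Str.startswith s ("capture_update_pass" ++ "_") = false := by
            rw [Bool.eq_false_iff]; simp [PySem.Chars.startswith_iff]; exact h4
          simp only [pvAGo, hsw1, hsw2, hsw3, hsw4, Bool.false_eq_true, if_false]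
          exact (pvB_nomatch s h1 h2 h3 h4 s.toList 0 0 (by simp)).symm
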